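-- pv_equiv track=rewrite | github.com/ChenPeng03/leetcode | word_search_II/solution.py | precheck
-- ===== SOURCE A (Python) =====
-- def precheck(word, letterlist):
--     a = letterlist.copy()
--     for i in word:
--         if i not in a:
--             return False
--         else:
--             a[i] -= 1
--             if a[i] < 0:
--                 return False
--     return True
-- ===== SOURCE B (Python) =====
-- def precheck(word, letterlist):
--     cnt = {}
--     for ch in word:
--         cnt[ch] = cnt.get(ch, 0) + 1
--     for ch, need in cnt.items():
--         if need > letterlist.get(ch, 0):
--             return False
--     return True
-- ===== Notes on version B (the rewrite author's own statement) =====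
-- stated objective: simpler
-- what changed: B first groups the word into a letter->count dict in one pass, then compares each distinct letter's required count against letterlist.get(letter,0), instead of A's stateful streaming decrement of a copied dict with early exit on each character.
import Mathlib
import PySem

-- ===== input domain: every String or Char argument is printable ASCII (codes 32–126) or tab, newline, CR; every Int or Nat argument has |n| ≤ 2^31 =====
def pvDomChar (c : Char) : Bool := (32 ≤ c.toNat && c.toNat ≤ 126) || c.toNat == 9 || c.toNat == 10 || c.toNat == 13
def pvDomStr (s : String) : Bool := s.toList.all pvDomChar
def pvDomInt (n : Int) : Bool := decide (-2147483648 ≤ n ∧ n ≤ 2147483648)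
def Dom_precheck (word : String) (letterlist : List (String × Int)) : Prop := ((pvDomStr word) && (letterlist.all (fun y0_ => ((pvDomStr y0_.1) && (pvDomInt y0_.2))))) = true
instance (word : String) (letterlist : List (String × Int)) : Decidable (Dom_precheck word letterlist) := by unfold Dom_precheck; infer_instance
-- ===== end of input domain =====

-- B counts the word once into a dict and compares each distinct letter's need against the
-- available count; A streams the word decrementing a copy of the dict with early exit.
-- Objective: simpler (one grouping pass + comparison instead of stateful decrements); equal cost.

-- ===== PORT A =====
-- the for-loop of A with its early returns, state = the mutated copy `a`
def precheckLoop : List Char → PySem.Dict String Int → Bool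
  | [], _ => true
  | c :: rest, a =>
    let k := String.ofList [c]
    if !(a.contains k) then false
    else
      let a' := a.insert k (a.getD k 0 - 1)   -- a[i] -= 1
      if a'.getD k 0 < 0 then false
      else precheckLoop rest a'

def precheck (word : String) (letterlist : List (String × Int)) : Bool :=
  precheckLoop word.toList (PySem.Dict.mk letterlist)

-- ===== PORT B =====
def precheck_alt (word : String) (letterlist : List (String × Int)) : Bool :=
  (word.toList.foldl
    (fun d c => d.insert (String.ofList [c]) (d.getD (String.ofList [c]) 0 + 1))
    PySem.Dict.empty).items.all (fun p => !(p.2 > (PySem.Dict.mk letterlist).getD p.1 0))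

-- ===== PRECONDITION & SPEC =====
def Spec_precheck (word : String) (letterlist : List (String × Int)) (out : Bool) : Prop := out = precheck_alt word letterlist
instance (word : String) (letterlist : List (String × Int)) (out : Bool) : Decidable (Spec_precheck word letterlist out) := by unfold Spec_precheck; infer_instance

-- ===== CLAIM (what is proved, stated in full; the proofs are below) =====
def Claim_equal_precheck : Prop := ∀ (word : String) (letterlist : List (String × Int)), Dom_precheck word letterlist → Spec_precheck word letterlist (precheck word letterlist)

-- ===== LEMMAS AND PROOFS =====

theorem key_inj {c c' : Char} (h : String.ofList [c] = String.ofList [c']) : c = c' := by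
  have := congrArg String.toList h
  simpa using this

-- A's loop returns true iff every character's total multiplicity fits the dict
theorem precheckLoop_eq (chars : List Char) (d : PySem.Dict String Int) :
    precheckLoop chars d
      = decide (∀ c ∈ chars, (chars.count c : Int) ≤ d.getD (String.ofList [c]) 0) := by
  induction chars generalizing d with
  | nil => simp [precheckLoop]
  | cons c rest ih =>
    cases hc : d.contains (String.ofList [c]) with
    | false =>
      have h0 : d.getD (String.ofList [c]) 0 = 0 :=
        PySem.Dict.getD_of_not_contains _ _ hc
      have hna : ¬ (∀ x ∈ c :: rest, ((c :: rest).count x : Int) ≤ d.getD (String.ofList [x]) 0) := by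
        intro h
        have := h c (by simp)
        rw [h0] at this
        simp only [List.count_cons_self] at this
        omega
      simp only [precheckLoop, hc, Bool.not_false, if_true]
      exact (decide_eq_false hna).symm
    | true =>
      simp only [precheckLoop, hc, Bool.not_true, Bool.false_eq_true, if_false,
        PySem.Dict.getD_insert_self]
      by_cases hneg : d.getD (String.ofList [c]) 0 - 1 < 0
      · rw [if_pos hneg]
        have hna : ¬ (∀ x ∈ c :: rest, ((c :: rest).count x : Int) ≤ d.getD (String.ofList [x]) 0) := by
          intro h
          have := h c (by simp)
          simp only [List.count_cons_self] at this
          omega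
        exact (decide_eq_false hna).symm
      · rw [if_neg hneg, ih]
        apply decide_eq_decide.mpr
        constructor
        · intro h x hx
          by_cases hxc : x = c
          · subst hxc
            simp only [List.count_cons_self]
            by_cases hxr : x ∈ rest
            · have := h x hxr
              rw [PySem.Dict.getD_insert, if_pos rfl] at this
              push_cast at this ⊢; omega
            · rw [List.count_eq_zero_of_not_mem hxr]; push_cast; omega
          · rw [List.mem_cons] at hx
            rcases hx with hx | hx
            · exact absurd hx hxc
            · have := h x hx
              rw [PySem.Dict.getD_insert,
                  if_neg (fun he => hxc (key_inj he))] at this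
              have hcount : (c :: rest).count x = rest.count x := by
                simp [List.count_cons]; exact fun h => hxc h.symm
              rw [hcount]; exact this
        · intro h x hx
          rw [PySem.Dict.getD_insert]
          by_cases hxc : x = c
          · subst hxc
            rw [if_pos rfl]
            have := h x (by simp)
            simp only [List.count_cons_self] at this
            push_cast at this ⊢; omega
          · rw [if_neg (fun he => hxc (key_inj he))]
            have := h x (List.mem_cons_of_mem _ hx)
            have hcount : (c :: rest).count x = rest.count x := by
              simp [List.count_cons]; exact fun h => hxc h.symm
            rw [hcount] at this; exact this

-- B returns true iff the same condition holds
theorem precheck_alt_eq (word : String) (letterlist : List (String × Int)) :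
    precheck_alt word letterlist
      = decide (∀ c ∈ word.toList,
          (word.toList.count c : Int)
            ≤ (PySem.Dict.mk letterlist).getD (String.ofList [c]) 0) := by
  unfold precheck_alt
  have hfold : word.toList.foldl
      (fun d c => d.insert (String.ofList [c]) (d.getD (String.ofList [c]) 0 + 1)) PySem.Dict.empty
      = PySem.Dict.counter (word.toList.map (fun c => String.ofList [c])) := by
    rw [← PySem.Dict.foldl_insert_getD_add_one_eq_counter, List.foldl_map]
  rw [hfold, PySem.Dict.items_counter, List.all_map]
  have hinj : Function.Injective (fun c : Char => String.ofList [c]) :=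
    fun _ _ h => key_inj h
  by_cases hdec : ∀ c ∈ word.toList, (word.toList.count c : Int)
      ≤ (PySem.Dict.mk letterlist).getD (String.ofList [c]) 0
  · rw [decide_eq_true hdec]
    apply List.all_eq_true.mpr
    intro k hk
    rw [PySem.Set.mem_ofList, List.mem_map] at hk
    obtain ⟨c, hc, rfl⟩ := hk
    have := hdec c hc
    simp only [Function.comp_apply, List.count_map_of_injective _ _ hinj,
      Bool.not_eq_true', decide_eq_false_iff_not, gt_iff_lt, not_lt]
    exact this
  · rw [decide_eq_false hdec]
    push_neg at hdec
    obtain ⟨c, hc, hlt⟩ := hdec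
    apply List.all_eq_false.mpr
    refine ⟨String.ofList [c],
      by simpa [PySem.Set.mem_ofList] using List.mem_map_of_mem hc, ?_⟩
    simp only [Function.comp_apply, List.count_map_of_injective _ _ hinj,
      Bool.not_eq_true', decide_eq_false_iff_not, gt_iff_lt, not_lt, not_le]
    omega

-- ===== VERDICT (by name: the statement is the Claim_ definition above) =====
theorem precheck_spec : Claim_equal_precheck := by
  intro word letterlist _
  unfold Spec_precheck precheck
  rw [precheckLoop_eq, precheck_alt_eq]
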